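-- pv_equiv track=rewrite | github.com/AntonioAltea/music-league-scripts | random_votes.py | is_result_valid
-- ===== SOURCE A (Python) =====
-- TOTAL_POSITIVES = 7
--
-- TOTAL_NEGATIVES = 3
--
-- TOTAL_VOTES = TOTAL_POSITIVES - TOTAL_NEGATIVES
--
-- def is_result_valid(results):
--     if sum(results.values()) != TOTAL_VOTES:
--         return False
--
--     if TOTAL_POSITIVES != sum([x for x in results.values() if x > 0]):
--         return False
--
--     if (0 - TOTAL_NEGATIVES) != sum([x for x in results.values() if x < 0]):
--         return False
--
--     return True
-- ===== SOURCE B (Python) =====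
-- TOTAL_POSITIVES = 7
--
-- TOTAL_NEGATIVES = 3
--
-- TOTAL_VOTES = TOTAL_POSITIVES - TOTAL_NEGATIVES
--
-- def is_result_valid(results):
--     # Budget consumption: start with the two allowed budgets and consume them.
--     # Positive budget only ever decreases, negative budget only ever decreases,
--     # so the moment either goes below zero the result is settled: return False early.
--     # The total-votes check of the spec is implied (total = positives + negatives).
--     pos_left = TOTAL_POSITIVES
--     neg_left = TOTAL_NEGATIVES
--     for v in results.values():
--         if v > 0:
--             pos_left -= v
--         elif v < 0:
--             neg_left += v
--         if pos_left < 0 or neg_left < 0: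
--             return False
--     return pos_left == 0 and neg_left == 0
-- ===== Notes on version B (the rewrite author's own statement) =====
-- stated objective: alternative
-- what changed: Instead of computing three sums and comparing them to constants, B consumes two fixed budgets (7 positive, 3 negative) while scanning once, aborts early with False as soon as a budget is overdrawn (budgets are monotone so overdraw is irrecoverable), and at the end checks both budgets are exactly exhausted; the redundant total-votes check is dropped because it is implied by the two budget checks.
import Mathlib
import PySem

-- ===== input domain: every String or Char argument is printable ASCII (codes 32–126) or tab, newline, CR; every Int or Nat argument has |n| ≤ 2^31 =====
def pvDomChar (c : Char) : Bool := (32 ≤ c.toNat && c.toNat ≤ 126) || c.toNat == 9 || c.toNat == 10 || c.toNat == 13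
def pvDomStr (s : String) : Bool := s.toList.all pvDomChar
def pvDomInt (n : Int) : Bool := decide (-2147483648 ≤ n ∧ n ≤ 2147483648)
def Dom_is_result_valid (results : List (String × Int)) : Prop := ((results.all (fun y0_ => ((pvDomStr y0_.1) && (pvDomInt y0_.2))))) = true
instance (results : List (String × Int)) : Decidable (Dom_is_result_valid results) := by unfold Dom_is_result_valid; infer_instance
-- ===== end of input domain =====

-- B replaces A's three summation-and-compare passes by a single budget-consuming scan
-- with early exit on overdraw; the redundant total check is dropped (alternative decomposition).
-- ===== PORT A =====
def is_result_valid (results : List (String × Int)) : Bool :=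
  let vals := results.map Prod.snd
  if (vals.foldl (· + ·) 0) ≠ 4 then false
  else if (7 : Int) ≠ ((vals.filter (fun x => decide (x > 0))).foldl (· + ·) 0) then false
  else if ((0 : Int) - 3) ≠ ((vals.filter (fun x => decide (x < 0))).foldl (· + ·) 0) then false
  else true

-- ===== PORT B =====
-- the budget-consuming loop with early exit (Source B's for-loop with its early return)
def pvConsume : List Int → Int → Int → Bool
  | [], posLeft, negLeft => decide (posLeft = 0) && decide (negLeft = 0)
  | v :: rest, posLeft, negLeft =>
    let s := if v > 0 then (posLeft - v, negLeft)
             else if v < 0 then (posLeft, negLeft + v)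
             else (posLeft, negLeft)
    if s.1 < 0 ∨ s.2 < 0 then false else pvConsume rest s.1 s.2

def is_result_valid_alt (results : List (String × Int)) : Bool :=
  pvConsume (results.map Prod.snd) 7 3

-- ===== PRECONDITION & SPEC =====
def Spec_is_result_valid (results : List (String × Int)) (out : Bool) : Prop := out = is_result_valid_alt results
instance (results : List (String × Int)) (out : Bool) : Decidable (Spec_is_result_valid results out) := by unfold Spec_is_result_valid; infer_instance

-- ===== CLAIM (what is proved, stated in full; the proofs are below) =====
def Claim_equal_is_result_valid : Prop := ∀ (results : List (String × Int)), Dom_is_result_valid results → Spec_is_result_valid results (is_result_valid results)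

-- ===== LEMMAS AND PROOFS =====
-- shifting the foldl accumulator of integer addition
theorem pvFoldlShift (m : List Int) (a : Int) :
    m.foldl (· + ·) a = a + m.foldl (· + ·) 0 := by
  induction m generalizing a with
  | nil => simp
  | cons x xs ih => simp only [List.foldl]; rw [ih (a + x), ih (0 + x)]; ring

-- the positive-filtered sum is nonnegative
theorem pvSumP_nonneg (l : List Int) :
    0 ≤ (l.filter (fun x => decide (x > 0))).foldl (· + ·) 0 := by
  induction l with
  | nil => simp
  | cons v rest ih =>
    simp only [List.filter_cons]
    by_cases h : v > 0
    · simp only [h, decide_true, if_pos, List.foldl, pvFoldlShift _ (0 + v)]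
      omega
    · simpa [h] using ih

-- the negative-filtered sum is nonpositive
theorem pvSumN_nonpos (l : List Int) :
    (l.filter (fun x => decide (x < 0))).foldl (· + ·) 0 ≤ 0 := by
  induction l with
  | nil => simp
  | cons v rest ih =>
    simp only [List.filter_cons]
    by_cases h : v < 0
    · simp only [h, decide_true, if_pos, List.foldl, pvFoldlShift _ (0 + v)]
      omega
    · simpa [h] using ih

-- characterisation of the budget loop: it succeeds iff the budgets are exactly the two filtered sums
theorem pvConsume_eq (l : List Int) (p n : Int) :
    pvConsume l p n =
      (decide (p = (l.filter (fun x => decide (x > 0))).foldl (· + ·) 0) &&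
       decide (n = -((l.filter (fun x => decide (x < 0))).foldl (· + ·) 0))) := by
  induction l generalizing p n with
  | nil => simp [pvConsume]
  | cons v rest ih =>
    have hp := pvSumP_nonneg rest
    have hn := pvSumN_nonpos rest
    simp only [pvConsume, List.filter_cons]
    by_cases h1 : v > 0
    · have h2 : ¬ v < 0 := by omega
      simp only [h1, h2, decide_true, decide_false, if_pos, if_neg, Bool.false_eq_true,
        not_false_iff, List.foldl, pvFoldlShift _ (0 + v)]
      by_cases hover : p - v < 0 ∨ (n : Int) < 0
      · rw [if_pos hover]
        symm
        simp only [Bool.and_eq_false_iff, decide_eq_false_iff_not]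
        omega
      · rw [if_neg hover, ih]
        have : (p - v = (rest.filter (fun x => decide (x > 0))).foldl (· + ·) 0)
             ↔ (p = 0 + v + (rest.filter (fun x => decide (x > 0))).foldl (· + ·) 0) := by omega
        simp [this]
    · by_cases h2 : v < 0
      · simp only [h1, h2, decide_true, decide_false, if_pos, if_neg, Bool.false_eq_true,
          not_false_iff, List.foldl, pvFoldlShift _ (0 + v)]
        by_cases hover : (p : Int) < 0 ∨ n + v < 0
        · rw [if_pos hover]
          symm
          simp only [Bool.and_eq_false_iff, decide_eq_false_iff_not]
          omega
        · rw [if_neg hover, ih]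
          have : (n + v = -((rest.filter (fun x => decide (x < 0))).foldl (· + ·) 0))
               ↔ (n = -(0 + v + (rest.filter (fun x => decide (x < 0))).foldl (· + ·) 0)) := by
            omega
          simp [this]
      · have h3 : v = 0 := by omega
        subst h3
        have h1' : ¬ (decide ((0:Int) > 0) = true) := by simp
        have h2' : ¬ (decide ((0:Int) < 0) = true) := by simp
        simp only [if_neg h1, if_neg h1']
        by_cases hover : (p : Int) < 0 ∨ (n : Int) < 0
        · rw [if_pos hover]
          symm
          simp only [Bool.and_eq_false_iff, decide_eq_false_iff_not]
          omega
        · rw [if_neg hover, ih]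

-- the total sum splits into the positive- and negative-filtered sums (zeros contribute nothing)
theorem pvSum_split (l : List Int) :
    l.foldl (· + ·) 0 = ((l.filter (fun x => decide (x > 0))).foldl (· + ·) 0)
      + ((l.filter (fun x => decide (x < 0))).foldl (· + ·) 0) := by
  induction l with
  | nil => simp
  | cons v rest ih =>
    simp only [List.filter_cons, List.foldl]
    by_cases h1 : v > 0
    · have h2 : ¬ v < 0 := by omega
      simp only [h1, h2, decide_true, decide_false, if_pos, if_neg, Bool.false_eq_true,
        not_false_iff, List.foldl, pvFoldlShift _ (0 + v)]
      rw [ih]; ring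
    · by_cases h2 : v < 0
      · simp only [h1, h2, decide_true, decide_false, if_pos, if_neg, Bool.false_eq_true,
          not_false_iff, List.foldl, pvFoldlShift _ (0 + v)]
        rw [ih]; ring
      · have h3 : v = 0 := by omega
        subst h3
        simpa using ih

-- ===== VERDICT (by name: the statement is the Claim_ definition above) =====
theorem is_result_valid_spec : Claim_equal_is_result_valid := by
  intro results _
  unfold Spec_is_result_valid is_result_valid is_result_valid_alt
  rw [pvConsume_eq]
  simp only [ne_eq, pvSum_split (results.map Prod.snd)]
  generalize ((results.map Prod.snd).filter (fun x => decide (x > 0))).foldl (· + ·) 0 = sp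
  generalize ((results.map Prod.snd).filter (fun x => decide (x < 0))).foldl (· + ·) 0 = sn
  by_cases h1 : sp + sn = 4 <;> by_cases h2 : sp = 7 <;> by_cases h3 : sn = -3 <;>
    simp [h1, h2, h3] <;>
      first
        | omega
        | (rw [Bool.eq_iff_iff]
           simp only [Bool.and_eq_true, decide_eq_true_eq]
           omega)
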